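-- pv_equiv track=rewrite | github.com/lumisphere/DUMP-internship-q | zadaci/Zadatak2WrongQuestionmark.py | izracunaj_sumu
-- ===== SOURCE A (Python) =====
-- def izracunaj_sumu(matrica):
--   """Izračunava sumu brojeva u matrici prema zadanim pravilima.
--
--   Args:
--     matrica: Lista lista, predstavlja matricu brojeva.
--
--   Returns:
--     Suma brojeva u matrici.
--   """
--
--   suma = 0
--   redova = len(matrica)
--   stupaca = len(matrica[0])
--
--   for i in range(redova):
--     for j in range(stupaca):
--       if (i % 2 == 0 and j % 2 == 0) or (i % 2 != 0 and j % 2 != 0):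
--         suma += matrica[i][j]
--       else:
--         suma -= matrica[i][j]
--
--   return suma
-- ===== SOURCE B (Python) =====
-- def izracunaj_sumu(matrica):
--   """Alternating matrix sum, built back-to-front: nesting t -> x - t realises the
--   (-1)**(i+j) signs without any parity tests."""
--   stupaca = len(matrica[0])
--   total = 0
--   for row in reversed(matrica):
--     row_val = 0
--     for j in reversed(range(stupaca)):
--       row_val = row[j] - row_val
--     total = row_val - total
--   return total
-- ===== Notes on version B (the rewrite author's own statement) =====
-- stated objective: alternative
-- what changed: B traverses rows and the column range in reverse and builds the signed sum back-to-front by nested subtraction (acc -> x - acc), eliminating every per-cell parity test, branch and index arithmetic of A.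
import Mathlib
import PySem

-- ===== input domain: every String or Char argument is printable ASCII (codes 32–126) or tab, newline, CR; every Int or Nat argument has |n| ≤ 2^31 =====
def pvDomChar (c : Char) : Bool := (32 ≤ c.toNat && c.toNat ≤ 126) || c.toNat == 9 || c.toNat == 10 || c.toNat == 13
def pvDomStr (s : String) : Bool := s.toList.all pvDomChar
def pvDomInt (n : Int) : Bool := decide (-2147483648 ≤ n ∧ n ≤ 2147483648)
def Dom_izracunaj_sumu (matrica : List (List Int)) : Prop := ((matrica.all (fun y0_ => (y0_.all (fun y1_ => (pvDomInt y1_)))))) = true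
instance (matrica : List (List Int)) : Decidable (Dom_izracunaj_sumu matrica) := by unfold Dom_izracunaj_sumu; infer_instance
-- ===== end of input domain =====

-- B builds the signed sum back-to-front by nested subtraction instead of A's per-cell parity tests.

-- ===== PORT A =====
def izracunaj_sumu (matrica : List (List Int)) : Int :=
  let redova : Int := matrica.length
  let stupaca : Int := (PySem.List.pyGetD matrica 0 []).length
  (PySem.List.pyRange 0 redova 1).foldl (fun suma i =>
    (PySem.List.pyRange 0 stupaca 1).foldl (fun suma j =>
      if (PySem.Int.mod i 2 == 0 && PySem.Int.mod j 2 == 0)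
         || (PySem.Int.mod i 2 != 0 && PySem.Int.mod j 2 != 0) then
        suma + PySem.List.pyGetD (PySem.List.pyGetD matrica i []) j 0
      else
        suma - PySem.List.pyGetD (PySem.List.pyGetD matrica i []) j 0) suma) 0

-- ===== PORT B =====
def izracunaj_sumu_alt (matrica : List (List Int)) : Int :=
  let stupaca : Int := (PySem.List.pyGetD matrica 0 []).length
  matrica.reverse.foldl (fun total row =>
    ((PySem.List.pyRange 0 stupaca 1).reverse.foldl
      (fun row_val j => PySem.List.pyGetD row j 0 - row_val) 0) - total) 0

-- ===== PRECONDITION & SPEC =====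
-- Pre_ excludes exactly the inputs where Python A raises IndexError: the empty matrix
-- (matrica[0] fails) and matrices with a row shorter than row 0 (matrica[i][j] fails).
def Pre_izracunaj_sumu (matrica : List (List Int)) : Prop :=
  matrica ≠ [] ∧ ∀ row ∈ matrica, (matrica.headD []).length ≤ row.length
instance (matrica : List (List Int)) : Decidable (Pre_izracunaj_sumu matrica) := by
  unfold Pre_izracunaj_sumu; infer_instance

def pvWitness_izracunaj_sumu : List (List Int) := [[1, 2], [3, 4]]

def Spec_izracunaj_sumu (matrica : List (List Int)) (out : Int) : Prop := out = izracunaj_sumu_alt matrica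
instance (matrica : List (List Int)) (out : Int) : Decidable (Spec_izracunaj_sumu matrica out) := by unfold Spec_izracunaj_sumu; infer_instance

-- ===== CLAIM (what is proved, stated in full; the proofs are below) =====
def Claim_equal_izracunaj_sumu : Prop := ∀ (matrica : List (List Int)), Dom_izracunaj_sumu matrica → Pre_izracunaj_sumu matrica → Spec_izracunaj_sumu matrica (izracunaj_sumu matrica)

-- ===== LEMMAS AND PROOFS =====

-- Alternating sum x0 - (x1 - (x2 - …)): the common reference value for both programs.
def pvAltSum : List Int → Int
  | [] => 0
  | x :: xs => x - pvAltSum xs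

-- B's inner reversed loop computes pvAltSum of the first `st` entries of the row.
theorem pvB_inner (row : List Int) :
    ∀ (a st : Int), 0 ≤ a → st.toNat ≤ row.length →
    (PySem.List.pyRange a st 1).reverse.foldl
      (fun row_val j => PySem.List.pyGetD row j 0 - row_val) 0
    = pvAltSum ((row.take st.toNat).drop a.toNat) := by
  intro a st ha hst
  by_cases hlt : a < st
  · have h1 : (0:Int) ≤ a + 1 := by omega
    have hterm : (st - (a+1)).toNat < (st - a).toNat := by omega
    rw [PySem.List.pyRange_one_cons hlt, List.reverse_cons, List.foldl_append]
    have IH := pvB_inner row (a+1) st h1 hst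
    rw [IH]
    have hdrop : (row.take st.toNat).drop a.toNat
        = row[a.toNat]'(by omega) :: (row.take st.toNat).drop (a+1).toNat := by
      have hlen : a.toNat < (row.take st.toNat).length := by
        simp [List.length_take]; omega
      rw [List.drop_eq_getElem_cons hlen]
      congr 1
      · rw [List.getElem_take]
      · congr 1; omega
    rw [hdrop]
    simp [pvAltSum, PySem.List.pyGetD, PySem.List.pyGet?, PySem.List.pyIdx?, ha,
      show a < (row.length : Int) by omega]
  · rw [PySem.List.pyRange_one_eq_nil (by omega)]
    have : (row.take st.toNat).drop a.toNat = [] := by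
      apply List.drop_eq_nil_of_le
      simp [List.length_take]; omega
    simp [this, pvAltSum]
termination_by a st => (st - a).toNat

-- A's inner loop: parity-signed accumulation equals ± the alternating sum,
-- the sign depending on whether i and the start index a have equal parity.
theorem pvA_inner (row : List Int) (i : Int) :
    ∀ (a st suma : Int), 0 ≤ a → st.toNat ≤ row.length →
    (PySem.List.pyRange a st 1).foldl (fun suma j =>
      if (PySem.Int.mod i 2 == 0 && PySem.Int.mod j 2 == 0)
         || (PySem.Int.mod i 2 != 0 && PySem.Int.mod j 2 != 0) then
        suma + PySem.List.pyGetD row j 0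
      else
        suma - PySem.List.pyGetD row j 0) suma
    = suma + (if PySem.Int.mod i 2 = PySem.Int.mod a 2 then 1 else -1)
        * pvAltSum ((row.take st.toNat).drop a.toNat) := by
  intro a st suma ha hst
  by_cases hlt : a < st
  · have h1 : (0:Int) ≤ a + 1 := by omega
    have hterm : (st - (a+1)).toNat < (st - a).toNat := by omega
    rw [PySem.List.pyRange_one_cons hlt, List.foldl_cons]
    rw [pvA_inner row i (a+1) st _ h1 hst]
    have hdrop : (row.take st.toNat).drop a.toNat
        = row[a.toNat]'(by omega) :: (row.take st.toNat).drop (a+1).toNat := by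
      have hlen : a.toNat < (row.take st.toNat).length := by
        simp [List.length_take]; omega
      rw [List.drop_eq_getElem_cons hlen]
      congr 1
      · rw [List.getElem_take]
      · congr 1; omega
    rw [hdrop]
    have hget : PySem.List.pyGetD row a 0 = row[a.toNat]'(by omega) := by
      simp [PySem.List.pyGetD, PySem.List.pyGet?, PySem.List.pyIdx?, ha,
        show a < (row.length : Int) by omega]
    have hma := PySem.Int.mod_two_eq a
    have hmi := PySem.Int.mod_two_eq i
    have hma1 : PySem.Int.mod (a+1) 2 = 1 - PySem.Int.mod a 2 := by
      rw [PySem.Int.mod_eq_emod_of_pos (by omega), PySem.Int.mod_eq_emod_of_pos (by omega)]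
      omega
    rcases hmi with hi | hi <;> rcases hma with hA | hA <;>
      simp only [hi, hA, hma1, hget, pvAltSum] <;> norm_num <;> ring
  · rw [PySem.List.pyRange_one_eq_nil (by omega)]
    have : (row.take st.toNat).drop a.toNat = [] := by
      apply List.drop_eq_nil_of_le
      simp [List.length_take]; omega
    simp [this, pvAltSum]
termination_by a st => (st - a).toNat

-- B's outer reversed loop, as a right-nested subtraction over the per-row values.
def pvRowsAlt (stupaca : Int) : List (List Int) → Int
  | [] => 0
  | row :: rest =>
      ((PySem.List.pyRange 0 stupaca 1).reverse.foldl
        (fun row_val j => PySem.List.pyGetD row j 0 - row_val) 0) - pvRowsAlt stupaca rest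

theorem pvB_outer (stupaca : Int) (rows : List (List Int)) :
    rows.reverse.foldl (fun total row =>
      ((PySem.List.pyRange 0 stupaca 1).reverse.foldl
        (fun row_val j => PySem.List.pyGetD row j 0 - row_val) 0) - total) 0
    = pvRowsAlt stupaca rows := by
  induction rows with
  | nil => simp [pvRowsAlt]
  | cons r rs ih =>
      rw [List.reverse_cons, List.foldl_append, List.foldl_cons, List.foldl_nil, ih]
      rfl

-- A's outer loop telescopes to pvRowsAlt of the row suffix, with a sign from the start parity.
theorem pvA_outer (matrica : List (List Int)) (stupaca : Int)
    (hrows : ∀ row ∈ matrica, stupaca.toNat ≤ row.length) :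
    ∀ (a suma : Int), 0 ≤ a →
    (PySem.List.pyRange a matrica.length 1).foldl (fun suma i =>
      (PySem.List.pyRange 0 stupaca 1).foldl (fun suma j =>
        if (PySem.Int.mod i 2 == 0 && PySem.Int.mod j 2 == 0)
           || (PySem.Int.mod i 2 != 0 && PySem.Int.mod j 2 != 0) then
          suma + PySem.List.pyGetD (PySem.List.pyGetD matrica i []) j 0
        else
          suma - PySem.List.pyGetD (PySem.List.pyGetD matrica i []) j 0) suma) suma
    = suma + (if PySem.Int.mod a 2 = 0 then 1 else -1)
        * pvRowsAlt stupaca (matrica.drop a.toNat) := by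
  intro a suma ha
  by_cases hlt : a < matrica.length
  · have h1 : (0:Int) ≤ a + 1 := by omega
    have hterm : ((matrica.length : Int) - (a+1)).toNat < ((matrica.length : Int) - a).toNat := by omega
    have hanat : a.toNat < matrica.length := by omega
    rw [PySem.List.pyRange_one_cons hlt, List.foldl_cons]
    have hget : PySem.List.pyGetD matrica a [] = matrica[a.toNat] := by
      simp [PySem.List.pyGetD, PySem.List.pyGet?, PySem.List.pyIdx?, ha,
        show a < (matrica.length : Int) by omega]
    have hrow : stupaca.toNat ≤ (matrica[a.toNat]).length :=
      hrows _ (List.getElem_mem hanat)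
    have hinner := pvA_inner (matrica[a.toNat]) a 0 stupaca suma (by omega) hrow
    simp only [hget]
    rw [hinner]
    have hm0 : PySem.Int.mod (0:Int) 2 = 0 := by decide
    have htake : ((matrica[a.toNat]).take stupaca.toNat).drop (0:Int).toNat
        = (matrica[a.toNat]).take stupaca.toNat := by simp
    have hB := pvB_inner (matrica[a.toNat]) 0 stupaca (by omega) hrow
    have hdrop : matrica.drop a.toNat = matrica[a.toNat] :: matrica.drop (a+1).toNat := by
      have h1n : a.toNat + 1 = (a+1).toNat := by omega
      rw [List.drop_eq_getElem_cons hanat, h1n]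
    rw [pvA_outer matrica stupaca hrows (a+1) _ h1, hdrop]
    simp only [pvRowsAlt, hB, htake, hm0]
    have hma := PySem.Int.mod_two_eq a
    have hma1 : PySem.Int.mod (a+1) 2 = 1 - PySem.Int.mod a 2 := by
      rw [PySem.Int.mod_eq_emod_of_pos (by omega), PySem.Int.mod_eq_emod_of_pos (by omega)]
      omega
    rcases hma with hA | hA <;> simp only [hA, hma1] <;> norm_num <;> ring
  · rw [PySem.List.pyRange_one_eq_nil (show (matrica.length : Int) ≤ a by omega)]
    have : matrica.drop a.toNat = [] := List.drop_eq_nil_of_le (by omega)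
    simp [this, pvRowsAlt]
termination_by a => ((matrica.length : Int) - a).toNat

-- ===== VERDICT (by name: the statement is the Claim_ definition above) =====
theorem izracunaj_sumu_spec : Claim_equal_izracunaj_sumu := by
  intro matrica _ hpre
  obtain ⟨hne, hrows⟩ := hpre
  unfold Spec_izracunaj_sumu izracunaj_sumu izracunaj_sumu_alt
  have hhead : PySem.List.pyGetD matrica 0 [] = matrica.headD [] := by
    cases matrica with
    | nil => simp at hne
    | cons r rs => simp [PySem.List.pyGetD, PySem.List.pyGet?, PySem.List.pyIdx?]
  have hrows' : ∀ row ∈ matrica,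
      ((PySem.List.pyGetD matrica 0 []).length : Int).toNat ≤ row.length := by
    intro row hr
    simpa [hhead] using hrows row hr
  rw [hhead]
  have hA := pvA_outer matrica ((matrica.headD []).length : Int)
    (by simpa [hhead] using hrows') 0 0 le_rfl
  have hB := pvB_outer ((matrica.headD []).length : Int) matrica
  simp only [hhead] at *
  rw [hA, hB]
  norm_num
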